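-- pv_equiv track=rewrite | github.com/Jintao-Huang/leetcode_notebook | python/template/math/big_int.py | nums_divmod_int
-- ===== SOURCE A (Python) =====
-- from typing import List, Tuple, Union
--
-- def nums_divmod_int(nums: List[int], x2: int) -> Tuple[List[int], int]:
--     ans = []
--     s = 0
--     for x in nums:
--         s *= 10
--         s += x
--         d, s = divmod(s, x2)
--         if d == 0 and len(ans) == 0:
--             continue
--         ans.append(d)
--     return ans, s
-- ===== SOURCE B (Python) =====
-- from typing import List, Tuple
--
-- def nums_divmod_int(nums: List[int], x2: int) -> Tuple[List[int], int]:
--     # Remainder-scan decomposition: first compute the chain of running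
--     # remainders only (no quotient digits), then recover each quotient digit
--     # by exact division from consecutive remainders, then strip leading zeros.
--     rems = [0]
--     for x in nums:
--         rems.append((10 * rems[-1] + x) % x2)
--     digits = [(10 * p + x - r) // x2 for p, x, r in zip(rems, nums, rems[1:])]
--     i = 0
--     while i < len(digits) and digits[i] == 0:
--         i += 1
--     return digits[i:], rems[-1]
-- ===== Notes on version B (the rewrite author's own statement) =====
-- stated objective: alternative
-- what changed: B replaces A's single divmod long-division loop by three staged passes: a scan computing only the chain of running remainders via %, a zip pass recovering each quotient digit by exact division from consecutive remainders, and a final leading-zero strip; Pre_ excludes x2 = 0, where A raises ZeroDivisionError.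
import Mathlib
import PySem

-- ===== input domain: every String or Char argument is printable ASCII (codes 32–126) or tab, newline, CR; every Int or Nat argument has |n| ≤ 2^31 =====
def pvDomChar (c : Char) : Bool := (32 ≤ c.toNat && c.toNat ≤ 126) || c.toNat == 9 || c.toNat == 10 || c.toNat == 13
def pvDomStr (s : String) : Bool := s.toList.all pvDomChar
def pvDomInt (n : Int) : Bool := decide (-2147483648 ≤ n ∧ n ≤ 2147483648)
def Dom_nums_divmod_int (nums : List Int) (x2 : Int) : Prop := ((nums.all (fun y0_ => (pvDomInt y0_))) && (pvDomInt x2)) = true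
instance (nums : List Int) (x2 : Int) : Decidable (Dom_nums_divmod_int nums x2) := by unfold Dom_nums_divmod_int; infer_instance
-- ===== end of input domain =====

-- B replaces the divmod long-division loop by a remainder-only scan followed by
-- exact-division recovery of the quotient digits and a leading-zero strip (alternative, not faster).

-- ===== PORT A =====
-- A's loop: state (ans, s); inline skip of leading zero quotient digits.
def nums_divmod_int (nums : List Int) (x2 : Int) : List Int × Int :=
  nums.foldl
    (fun st x =>
      let s := st.2 * 10 + x
      let d := PySem.Int.floordiv s x2
      let s := PySem.Int.mod s x2
      if d = 0 ∧ st.1 = [] then (st.1, s) else (st.1 ++ [d], s))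
    ([], 0)

-- ===== PORT B =====
-- B's 'while i: i += 1' leading-zero counter, as the obvious structural recursion.
def pvLeadZeros : List Int → Nat
  | [] => 0
  | d :: ds => if d = 0 then pvLeadZeros ds + 1 else 0

-- rems is always nonempty in Source B (it starts as [0]), so rems[-1] is getLastD 0;
-- digits[i:] with 0 ≤ i is List.drop.
def nums_divmod_int_alt (nums : List Int) (x2 : Int) : List Int × Int :=
  let rems := nums.foldl (fun rems x => rems ++ [PySem.Int.mod (10 * rems.getLastD 0 + x) x2]) [0]
  let digits := (rems.zip (nums.zip (rems.drop 1))).map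
    (fun pr => PySem.Int.floordiv (10 * pr.1 + pr.2.1 - pr.2.2) x2)
  (digits.drop (pvLeadZeros digits), rems.getLastD 0)

-- ===== PRECONDITION & SPEC =====
-- Pre_ excludes exactly x2 = 0, where the Python A raises ZeroDivisionError.
def Pre_nums_divmod_int (nums : List Int) (x2 : Int) : Prop := x2 ≠ 0
instance (nums : List Int) (x2 : Int) : Decidable (Pre_nums_divmod_int nums x2) := by unfold Pre_nums_divmod_int; infer_instance
def pvWitness_nums_divmod_int : List Int × Int := ([0, 2, 0, 4], 3)

def Spec_nums_divmod_int (nums : List Int) (x2 : Int) (out : List Int × Int) : Prop := out = nums_divmod_int_alt nums x2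
instance (nums : List Int) (x2 : Int) (out : List Int × Int) : Decidable (Spec_nums_divmod_int nums x2 out) := by unfold Spec_nums_divmod_int; infer_instance

-- ===== CLAIM (what is proved, stated in full; the proofs are below) =====
def Claim_equal_nums_divmod_int : Prop := ∀ (nums : List Int) (x2 : Int), Dom_nums_divmod_int nums x2 → Pre_nums_divmod_int nums x2 → Spec_nums_divmod_int nums x2 (nums_divmod_int nums x2)

-- ===== LEMMAS AND PROOFS =====

-- Common reference semantics: the digit stream and final remainder of long division.
def pvDigits (x2 : Int) : List Int → Int → List Int
  | [], _ => []
  | x :: xs, s => PySem.Int.floordiv (s * 10 + x) x2 :: pvDigits x2 xs (PySem.Int.mod (s * 10 + x) x2)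

def pvRem (x2 : Int) : List Int → Int → Int
  | [], s => s
  | x :: xs, s => pvRem x2 xs (PySem.Int.mod (s * 10 + x) x2)

def pvStripLead : List Int → List Int
  | [] => []
  | d :: ds => if d = 0 then pvStripLead ds else d :: ds

def pvRems (x2 : Int) : List Int → Int → List Int
  | [], _ => []
  | x :: xs, s => PySem.Int.mod (s * 10 + x) x2 :: pvRems x2 xs (PySem.Int.mod (s * 10 + x) x2)

-- ---- A side: the fold equals strip-of-digits ----
theorem foldA_ne (x2 : Int) (nums : List Int) : ∀ (acc : List Int) (s : Int), acc ≠ [] →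
    nums.foldl (fun st x =>
        let s := st.2 * 10 + x
        let d := PySem.Int.floordiv s x2
        let s := PySem.Int.mod s x2
        if d = 0 ∧ st.1 = [] then (st.1, s) else (st.1 ++ [d], s)) (acc, s)
      = (acc ++ pvDigits x2 nums s, pvRem x2 nums s) := by
  induction nums with
  | nil => intro acc s _; simp [pvDigits, pvRem]
  | cons x xs ih =>
    intro acc s hacc
    simp only [List.foldl_cons, pvDigits, pvRem]
    rw [if_neg (by simp [hacc]), ih _ _ (by simp)]
    simp

theorem foldA_nil (x2 : Int) (nums : List Int) : ∀ (s : Int),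
    nums.foldl (fun st x =>
        let s := st.2 * 10 + x
        let d := PySem.Int.floordiv s x2
        let s := PySem.Int.mod s x2
        if d = 0 ∧ st.1 = [] then (st.1, s) else (st.1 ++ [d], s)) ([], s)
      = (pvStripLead (pvDigits x2 nums s), pvRem x2 nums s) := by
  induction nums with
  | nil => intro s; simp [pvDigits, pvRem, pvStripLead]
  | cons x xs ih =>
    intro s
    simp only [List.foldl_cons, pvDigits, pvRem]
    by_cases hd : PySem.Int.floordiv (s * 10 + x) x2 = 0
    · rw [if_pos (by simp [hd]), ih]
      simp [pvStripLead, hd]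
    · rw [if_neg (by simp [hd]), foldA_ne _ _ _ _ (by simp)]
      simp [pvStripLead, hd]

-- ---- B side ----
theorem foldRems (x2 : Int) (nums : List Int) : ∀ (acc : List Int) (s : Int), acc ≠ [] → acc.getLastD 0 = s →
    nums.foldl (fun rems x => rems ++ [PySem.Int.mod (10 * rems.getLastD 0 + x) x2]) acc
      = acc ++ pvRems x2 nums s := by
  induction nums with
  | nil => intro acc s _ _; simp [pvRems]
  | cons x xs ih =>
    intro acc s hne hl
    simp only [List.foldl_cons, pvRems]
    have h10 : (10 : Int) * acc.getLastD 0 + x = s * 10 + x := by rw [hl]; ring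
    rw [h10, ih (acc ++ [PySem.Int.mod (s * 10 + x) x2]) (PySem.Int.mod (s * 10 + x) x2) (by simp) (by simp)]
    simp

theorem lastRems (x2 : Int) (nums : List Int) : ∀ (s : Int),
    (s :: pvRems x2 nums s).getLastD 0 = pvRem x2 nums s := by
  induction nums with
  | nil => intro s; simp [pvRems, pvRem]
  | cons x xs ih =>
    intro s
    have h := ih (PySem.Int.mod (s * 10 + x) x2)
    simp only [pvRems, pvRem, List.getLastD_cons] at h ⊢
    exact h

theorem dropLeadZeros : ∀ (ds : List Int), ds.drop (pvLeadZeros ds) = pvStripLead ds := by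
  intro ds
  induction ds with
  | nil => simp [pvLeadZeros, pvStripLead]
  | cons d ds ih =>
    by_cases hd : d = 0
    · simp [pvLeadZeros, pvStripLead, hd, ih]
    · simp [pvLeadZeros, pvStripLead, hd]

theorem fd_eq (a b : Int) : PySem.Int.floordiv a b = Int.fdiv a b := rfl

theorem fd_cancel (d b : Int) (h : b ≠ 0) : PySem.Int.floordiv (d * b) b = d := by
  rw [fd_eq]; exact Int.mul_fdiv_cancel _ h

theorem zipDigits (x2 : Int) (hx2 : x2 ≠ 0) (nums : List Int) : ∀ (s : Int),
    ((s :: pvRems x2 nums s).zip (nums.zip (pvRems x2 nums s))).map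
      (fun pr => PySem.Int.floordiv (10 * pr.1 + pr.2.1 - pr.2.2) x2)
      = pvDigits x2 nums s := by
  induction nums with
  | nil => intro s; simp [pvRems, pvDigits]
  | cons x xs ih =>
    intro s
    simp only [pvRems, pvDigits, List.zip_cons_cons, List.map_cons]
    rw [ih (PySem.Int.mod (s * 10 + x) x2)]
    congr 1
    have hm := PySem.Int.floordiv_mul_add_mod (s * 10 + x) x2
    have h : (10 : Int) * s + x - PySem.Int.mod (s * 10 + x) x2
        = PySem.Int.floordiv (s * 10 + x) x2 * x2 := by linarith
    rw [h, fd_cancel _ _ hx2]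

-- ===== VERDICT (by name: the statement is the Claim_ definition above) =====
theorem nums_divmod_int_spec : Claim_equal_nums_divmod_int := by
  intro nums x2 _ hx2
  simp only [Spec_nums_divmod_int, nums_divmod_int, nums_divmod_int_alt]
  rw [foldA_nil]
  have hr := foldRems x2 nums [0] 0 (by simp) rfl
  rw [hr, List.singleton_append, List.drop_one, List.tail_cons,
      zipDigits x2 hx2 nums 0, lastRems, dropLeadZeros]
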